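-- pv_equiv track=rewrite | github.com/qwerty7878/Algorithm | 프로그래머스/0/181854. 배열의 길이에 따라 다른 연산하기/배열의 길이에 따라 다른 연산하기.py | solution
-- ===== SOURCE A (Python) =====
-- def solution(arr, n):
--     answer = []
--     if len(arr) % 2 != 0:
--         for i in range(0, len(arr)):
--             if i % 2 == 0:
--                 answer.append(arr[i] + n)
--             else:
--                 answer.append(arr[i])
--     else:
--         for i in range(0, len(arr)):
--             if i % 2 != 0:
--                 answer.append(arr[i] + n)
--             else:
--                 answer.append(arr[i])
--     return answer
-- ===== SOURCE B (Python) =====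
-- def solution(arr, n):
--     # Uniform rule: n is added exactly at the positions an even distance from
--     # the END of the list, whatever the length's parity -- so no length-parity
--     # case split is needed.  Walk the list backwards once with a toggling
--     # flag, then flip the built list back.
--     out = []
--     add = True
--     for x in reversed(arr):
--         out.append(x + n if add else x)
--         add = not add
--     out.reverse()
--     return out
-- ===== Notes on version B (the rewrite author's own statement) =====
-- stated objective: simpler
-- what changed: A branches on the length's parity and tests i%2 at every index of a forward scan; B uses the uniform rule that n is added exactly at even distance from the end, so it walks the list backwards once with a toggling flag and reverses the result - no length-parity case split and no index arithmetic.
import Mathlib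
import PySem

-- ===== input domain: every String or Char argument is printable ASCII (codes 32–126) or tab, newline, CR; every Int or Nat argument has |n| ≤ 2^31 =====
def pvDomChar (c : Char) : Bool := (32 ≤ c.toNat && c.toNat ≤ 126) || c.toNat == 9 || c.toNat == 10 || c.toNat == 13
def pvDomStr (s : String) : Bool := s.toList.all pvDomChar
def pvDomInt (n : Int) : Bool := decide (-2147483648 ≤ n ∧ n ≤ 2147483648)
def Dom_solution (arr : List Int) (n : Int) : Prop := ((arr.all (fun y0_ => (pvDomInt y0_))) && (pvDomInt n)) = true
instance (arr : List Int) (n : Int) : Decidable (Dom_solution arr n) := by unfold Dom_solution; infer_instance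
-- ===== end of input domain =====

-- B drops A's length-parity case split (and the per-index i%2 test over a forward scan):
-- n is added exactly at even distance from the END, so B walks the list backwards once
-- with a toggling flag and reverses the result (objective: simpler).


-- ===== PORT A =====
def solution (arr : List Int) (n : Int) : List Int :=
  if arr.length % 2 ≠ 0 then
    (PySem.List.pyRange 0 arr.length 1).foldl (fun answer i =>
      if PySem.Int.mod i 2 == 0 then answer ++ [PySem.List.pyGetD arr i 0 + n]
      else answer ++ [PySem.List.pyGetD arr i 0]) []
  else
    (PySem.List.pyRange 0 arr.length 1).foldl (fun answer i =>
      if PySem.Int.mod i 2 != 0 then answer ++ [PySem.List.pyGetD arr i 0 + n]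
      else answer ++ [PySem.List.pyGetD arr i 0]) []

-- ===== PORT B =====
-- Source B: 'for x in reversed(arr)' appending (x+n) when the toggling flag is set, then out.reverse()
def solution_alt (arr : List Int) (n : Int) : List Int :=
  let st := arr.reverse.foldl
    (fun (st : List Int × Bool) x =>
      (st.1 ++ [if st.2 then x + n else x], !st.2)) ([], true)
  st.1.reverse

-- ===== PRECONDITION & SPEC =====
def Spec_solution (arr : List Int) (n : Int) (out : List Int) : Prop := out = solution_alt arr n
instance (arr : List Int) (n : Int) (out : List Int) : Decidable (Spec_solution arr n out) := by unfold Spec_solution; infer_instance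

-- ===== CLAIM =====
def Claim_equal_solution : Prop := ∀ (arr : List Int) (n : Int), Dom_solution arr n → Spec_solution arr n (solution arr n)

-- ===== LEMMAS AND PROOFS =====

-- A's append-only fold over range(len(arr)), characterised index-wise
theorem fold_eq_map (arr : List Int) (g : Int → Int) :
    (PySem.List.pyRange 0 arr.length 1).foldl (fun answer i => answer ++ [g i]) [] =
      (List.range arr.length).map (fun k : Nat => g k) := by
  rw [PySem.List.foldl_append_singleton_eq_map, PySem.List.pyRange_one]
  simp [List.map_map, Function.comp_def]

-- B's backward pass with a toggling flag, characterised index-wise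
theorem fold_toggle (n : Int) (l acc : List Int) (b : Bool) :
    (l.foldl (fun (st : List Int × Bool) x =>
        (st.1 ++ [if st.2 then x + n else x], !st.2)) (acc, b)).1 =
      acc ++ (List.range l.length).map
        (fun k => l.getD k 0 + if (decide (k % 2 = 0)) == b then n else 0) := by
  induction l generalizing acc b with
  | nil => simp
  | cons x xs ih =>
      simp only [List.foldl_cons, ih, List.length_cons, List.range_succ_eq_map,
        List.map_cons, List.map_map, Function.comp_def, List.getD_cons_zero,
        List.getD_cons_succ]
      rw [List.append_assoc]
      congr 1
      cases b <;> simp <;> (intro a _; split_ifs <;> first | rfl | omega)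

-- the two index-wise characterisations agree: position i gets +n iff its distance
-- from the end, arr.length - 1 - i, is even
theorem map_eq_rev_map (arr : List Int) (n : Int) (f : Nat → Int)
    (hf : ∀ i, i < arr.length →
      f i = arr.getD i 0 + if (arr.length - 1 - i) % 2 = 0 then n else 0) :
    (List.range arr.length).map f =
      ((List.range arr.reverse.length).map
        (fun k => arr.reverse.getD k 0 +
          if (decide (k % 2 = 0)) == true then n else 0)).reverse := by
  apply List.ext_getElem
  · simp
  · intro i h1 h2
    simp only [List.length_map, List.length_range] at h1
    have hlen : arr.reverse.length = arr.length := by simp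
    simp only [List.getElem_reverse, List.getElem_map, List.getElem_range, hlen,
      List.length_map, List.length_range]
    rw [hf i h1]
    have h3 : arr.length - 1 - i < arr.length := by omega
    have : arr.reverse.getD (arr.length - 1 - i) 0 = arr.getD i 0 := by
      rw [List.getD_eq_getElem _ _ (by omega), List.getD_eq_getElem _ _ h1,
        List.getElem_reverse]
      congr 1
      omega
    rw [this]
    congr 1
    by_cases hp : (arr.length - 1 - i) % 2 = 0 <;> simp [hp]

-- ===== VERDICT =====
theorem solution_spec : Claim_equal_solution := by
  intro arr n _
  show solution arr n = solution_alt arr n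
  unfold solution solution_alt
  simp only [fold_toggle, List.nil_append]
  rcases Nat.even_or_odd arr.length with h | h
  · have h2 : arr.length % 2 = 0 := Nat.even_iff.mp h
    simp only [h2, ne_eq, not_true_eq_false, if_false]
    rw [show (fun (answer : List Int) (i : Int) =>
        if PySem.Int.mod i 2 != 0 then answer ++ [PySem.List.pyGetD arr i 0 + n]
        else answer ++ [PySem.List.pyGetD arr i 0]) =
        (fun answer i => answer ++ [if PySem.Int.mod i 2 != 0 then PySem.List.pyGetD arr i 0 + n
          else PySem.List.pyGetD arr i 0]) from by funext ans i; split <;> rfl]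
    rw [fold_eq_map arr]
    apply map_eq_rev_map
    intro i hi
    simp only [PySem.List.pyGetD_natCast]
    have hm : PySem.Int.mod (i : Int) 2 = ((i % 2 : Nat) : Int) := by
      exact_mod_cast PySem.Int.mod_natCast i 2
    rcases Nat.even_or_odd i with hk | hk
    · have hkk := Nat.even_iff.mp hk
      have : (arr.length - 1 - i) % 2 ≠ 0 := by omega
      simp [this]; (intro hc; exact absurd hc (by omega))
    · have hkk := Nat.odd_iff.mp hk
      have : (arr.length - 1 - i) % 2 = 0 := by omega
      simp [this]; (intro hc; exact absurd hc (by omega))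
  · have h2 : arr.length % 2 = 1 := Nat.odd_iff.mp h
    simp only [h2, ne_eq, one_ne_zero, not_false_eq_true, if_true]
    rw [show (fun (answer : List Int) (i : Int) =>
        if PySem.Int.mod i 2 == 0 then answer ++ [PySem.List.pyGetD arr i 0 + n]
        else answer ++ [PySem.List.pyGetD arr i 0]) =
        (fun answer i => answer ++ [if PySem.Int.mod i 2 == 0 then PySem.List.pyGetD arr i 0 + n
          else PySem.List.pyGetD arr i 0]) from by funext ans i; split <;> rfl]
    rw [fold_eq_map arr]
    apply map_eq_rev_map
    intro i hi
    simp only [PySem.List.pyGetD_natCast]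
    have hm : PySem.Int.mod (i : Int) 2 = ((i % 2 : Nat) : Int) := by
      exact_mod_cast PySem.Int.mod_natCast i 2
    rcases Nat.even_or_odd i with hk | hk
    · have hkk := Nat.even_iff.mp hk
      have : (arr.length - 1 - i) % 2 = 0 := by omega
      simp [this]; (intro hc; exact absurd hc (by omega))
    · have hkk := Nat.odd_iff.mp hk
      have : (arr.length - 1 - i) % 2 ≠ 0 := by omega
      simp [this]; (intro hc; exact absurd hc (by omega))
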